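-- pv_equiv track=rewrite | github.com/turklaw83-TLOnetizen/Mushroom | core/case_manager.py | diff_file_fingerprints
-- ===== SOURCE A (Python) =====
-- from typing import Any, Dict, List, Optional
--
-- def diff_file_fingerprints(saved: Dict[str, str],
--                            current: Dict[str, str]) -> Dict:
--     """Compare two fingerprint dicts and return added/removed/changed."""
--     saved_set = set(saved.keys())
--     current_set = set(current.keys())
--     return {
--         "added": sorted(current_set - saved_set),
--         "removed": sorted(saved_set - current_set),
--         "changed": sorted(
--             f for f in saved_set & current_set
--             if saved[f] != current[f]
--         ),
--     }
-- ===== SOURCE B (Python) =====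
-- def diff_file_fingerprints(saved, current):
--     """Compare two fingerprint dicts and return added/removed/changed."""
--     s = sorted(saved.items(), key=lambda kv: kv[0])
--     c = sorted(current.items(), key=lambda kv: kv[0])
--     added, removed, changed = [], [], []
--     i = j = 0
--     while i < len(s) and j < len(c):
--         ks, vs = s[i]
--         kc, vc = c[j]
--         if ks == kc:
--             if vs != vc:
--                 changed.append(ks)
--             i += 1
--             j += 1
--         elif ks < kc:
--             removed.append(ks)
--             i += 1
--         else:
--             added.append(kc)
--             j += 1
--     removed.extend(k for k, _ in s[i:])
--     added.extend(k for k, _ in c[j:])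
--     return {"added": added, "removed": removed, "changed": changed}
-- ===== Notes on version B (the rewrite author's own statement) =====
-- stated objective: alternative
-- what changed: Replaces A's three hash-set operations plus three independent sorts by sorting the two item lists once and merging them with two pointers, classifying each key into added/removed/changed during the merge and emitting the three lists already in sorted order.
import Mathlib
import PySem

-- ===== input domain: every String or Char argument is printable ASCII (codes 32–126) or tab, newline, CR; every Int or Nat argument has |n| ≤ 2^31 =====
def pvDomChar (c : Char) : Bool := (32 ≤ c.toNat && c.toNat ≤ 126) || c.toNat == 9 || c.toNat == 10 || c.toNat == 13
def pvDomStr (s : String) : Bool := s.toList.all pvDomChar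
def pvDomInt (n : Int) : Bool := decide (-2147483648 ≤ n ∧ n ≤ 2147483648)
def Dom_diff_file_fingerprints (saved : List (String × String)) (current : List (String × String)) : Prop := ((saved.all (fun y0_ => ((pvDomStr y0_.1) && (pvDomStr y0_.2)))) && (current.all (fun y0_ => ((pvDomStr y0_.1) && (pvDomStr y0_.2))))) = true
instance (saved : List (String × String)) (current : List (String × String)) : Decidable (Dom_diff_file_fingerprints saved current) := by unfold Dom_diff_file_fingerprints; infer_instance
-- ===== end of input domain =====

-- B replaces A's set algebra + three sorts by sorting the two item lists once and merging them with
-- two pointers, emitting the three result lists already in sorted order (alternative algorithm).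
-- ===== PORT A =====
def diff_file_fingerprints (saved : List (String × String)) (current : List (String × String)) : List (String × List String) :=
  let savedD := PySem.Dict.mk saved
  let currentD := PySem.Dict.mk current
  let saved_set := PySem.Set.ofList savedD.keys
  let current_set := PySem.Set.ofList currentD.keys
  [("added", PySem.List.sorted (PySem.Set.diff current_set saved_set) (fun x => x) false),
   ("removed", PySem.List.sorted (PySem.Set.diff saved_set current_set) (fun x => x) false),
   ("changed", PySem.List.sorted
      ((PySem.Set.inter saved_set current_set).filter
        (fun f => savedD.getD f "" != currentD.getD f "")) (fun x => x) false)]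

-- ===== PORT B =====
-- B's while loop over the two cursors i, j becomes the obvious recursion on the two remaining
-- suffixes s[i:], c[j:] with the same branch structure; the trailing extends are the base cases.
def pvMerge : List (String × String) → List (String × String) → List String × List String × List String
  | [], c => (c.map Prod.fst, [], [])
  | (ks, _vs) :: s, [] => ([], ks :: s.map Prod.fst, [])
  | (ks, vs) :: s, (kc, vc) :: c =>
    if ks == kc then
      let r := pvMerge s c
      (r.1, r.2.1, if vs != vc then ks :: r.2.2 else r.2.2)
    else if ks < kc then
      let r := pvMerge s ((kc, vc) :: c)
      (r.1, ks :: r.2.1, r.2.2)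
    else
      let r := pvMerge ((ks, vs) :: s) c
      (kc :: r.1, r.2.1, r.2.2)
termination_by s c => s.length + c.length

def diff_file_fingerprints_alt (saved : List (String × String)) (current : List (String × String)) : List (String × List String) :=
  let s := PySem.List.sorted saved (fun kv => kv.1) false
  let c := PySem.List.sorted current (fun kv => kv.1) false
  let r := pvMerge s c
  [("added", r.1), ("removed", r.2.1), ("changed", r.2.2)]

-- ===== PRECONDITION & SPEC =====
-- Pre_ requires distinct keys in each association list: the lists encode Python dicts, which cannot
-- contain a duplicate key, so no Python-reachable input is excluded.
def Pre_diff_file_fingerprints (saved : List (String × String)) (current : List (String × String)) : Prop :=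
  (saved.map Prod.fst).Nodup ∧ (current.map Prod.fst).Nodup
instance (saved : List (String × String)) (current : List (String × String)) : Decidable (Pre_diff_file_fingerprints saved current) := by unfold Pre_diff_file_fingerprints; infer_instance
def pvWitness_diff_file_fingerprints : (List (String × String)) × (List (String × String)) :=
  ([("a.py", "1"), ("b.py", "2")], [("a.py", "1"), ("b.py", "3"), ("c.py", "4")])

def Spec_diff_file_fingerprints (saved : List (String × String)) (current : List (String × String)) (out : List (String × List String)) : Prop := out = diff_file_fingerprints_alt saved current
instance (saved : List (String × String)) (current : List (String × String)) (out : List (String × List String)) : Decidable (Spec_diff_file_fingerprints saved current out) := by unfold Spec_diff_file_fingerprints; infer_instance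

-- ===== CLAIM (what is proved, stated in full; the proofs are below) =====
def Claim_equal_diff_file_fingerprints : Prop := ∀ (saved : List (String × String)) (current : List (String × String)), Dom_diff_file_fingerprints saved current → Pre_diff_file_fingerprints saved current → Spec_diff_file_fingerprints saved current (diff_file_fingerprints saved current)

-- ===== LEMMAS AND PROOFS =====

-- first-match association lookup with default "", used only to characterise pvMerge
def pvLook : List (String × String) → String → String
  | [], _ => ""
  | (k, v) :: t, x => if x == k then v else pvLook t x

lemma pvLook_of_mem {l : List (String × String)} {k v : String}
    (h : (k, v) ∈ l) (hnd : (l.map Prod.fst).Nodup) : pvLook l k = v := by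
  induction l with
  | nil => cases h
  | cons p t ih =>
    obtain ⟨p1, p2⟩ := p
    rw [List.map_cons, List.nodup_cons] at hnd
    rcases List.mem_cons.mp h with h' | h'
    · injection h' with e1 e2
      subst e1
      subst e2
      simp [pvLook]
    · have hk : (k == p1) = false := by
        refine beq_eq_false_iff_ne.mpr fun hkp => ?_
        exact hnd.1 (hkp ▸ List.mem_map.mpr ⟨(k, v), h', rfl⟩)
      simp only [pvLook, hk, Bool.false_eq_true, if_false]
      exact ih h' hnd.2

-- characterises pvMerge on key-strictly-increasing lists by three filters
lemma pvMerge_eq (s c : List (String × String))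
    (hs : (s.map Prod.fst).Pairwise (· < ·)) (hc : (c.map Prod.fst).Pairwise (· < ·)) :
    pvMerge s c =
      ((c.filter (fun kv => !(s.map Prod.fst).contains kv.1)).map Prod.fst,
       (s.filter (fun kv => !(c.map Prod.fst).contains kv.1)).map Prod.fst,
       (s.filter (fun kv => (c.map Prod.fst).contains kv.1 && (kv.2 != pvLook c kv.1))).map Prod.fst) := by
  induction s, c using pvMerge.induct with
  | case1 c => simp [pvMerge]
  | case2 ks _vs s => simp [pvMerge]
  | case3 ks vs s kc vc c heq ih =>
    have hks : ks = kc := beq_iff_eq.mp heq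
    subst hks
    rw [List.map_cons, List.pairwise_cons] at hs hc
    have hsk : ∀ y ∈ s.map Prod.fst, ks < y := hs.1
    have hck : ∀ y ∈ c.map Prod.fst, ks < y := hc.1
    simp only [pvMerge]
    rw [if_pos heq, ih hs.2 hc.2]
    simp only [Prod.mk.injEq]
    refine ⟨?_, ?_, ?_⟩
    · -- added: the head of c is dropped (its key is a saved key); tail keys never equal ks
      rw [List.filter_cons]
      have h1 : (!(((ks, vs) :: s).map Prod.fst).contains ks) = false := by simp
      rw [h1]
      simp only [Bool.false_eq_true, if_false]
      congr 1
      apply List.filter_congr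
      intro kv hkv
      have hne : ks ≠ kv.1 := ne_of_lt (hck _ (List.mem_map.mpr ⟨kv, hkv, rfl⟩))
      simp [hne.symm]
    · -- removed: the head of s is dropped (its key is a current key); tail keys never equal ks
      rw [List.filter_cons]
      have h1 : (!(((ks, vc) :: c).map Prod.fst).contains ks) = false := by simp
      rw [h1]
      simp only [Bool.false_eq_true, if_false]
      congr 1
      apply List.filter_congr
      intro kv hkv
      have hne : ks ≠ kv.1 := ne_of_lt (hsk _ (List.mem_map.mpr ⟨kv, hkv, rfl⟩))
      simp [hne.symm]
    · -- changed: the head pair compares vs with vc; tail conditions ignore the dropped head of c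
      rw [List.filter_cons]
      have hlk : pvLook ((ks, vc) :: c) ks = vc := by simp [pvLook]
      have h1 : ((((ks, vc) :: c).map Prod.fst).contains ks && (vs != pvLook ((ks, vc) :: c) ks)) = (vs != vc) := by
        simp [hlk]
      rw [h1]
      have h2 : (s.filter (fun kv => (((ks, vc) :: c).map Prod.fst).contains kv.1 && (kv.2 != pvLook ((ks, vc) :: c) kv.1)))
          = (s.filter (fun kv => ((c.map Prod.fst).contains kv.1 && (kv.2 != pvLook c kv.1)))) := by
        apply List.filter_congr
        intro kv hkv
        have hne : ks ≠ kv.1 := ne_of_lt (hsk _ (List.mem_map.mpr ⟨kv, hkv, rfl⟩))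
        have hb : (kv.1 == ks) = false := beq_eq_false_iff_ne.mpr hne.symm
        simp [pvLook, hb, hne.symm]
      rw [h2]
      by_cases hvc : (vs != vc) = true
      · simp [hvc]
      · rw [Bool.not_eq_true] at hvc
        simp [hvc]
  | case4 ks vs s kc vc c heq hlt ih =>
    rw [List.map_cons, List.pairwise_cons] at hs hc
    have hsk : ∀ y ∈ s.map Prod.fst, ks < y := hs.1
    have hck : ∀ y ∈ c.map Prod.fst, kc < y := hc.1
    have hksc : ∀ y ∈ ((kc, vc) :: c).map Prod.fst, ks < y := by
      intro y hy
      rw [List.map_cons] at hy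
      rcases List.mem_cons.mp hy with h | h
      · exact h ▸ hlt
      · exact lt_trans hlt (hck _ h)
    have hcpw : (((kc, vc) :: c).map Prod.fst).Pairwise (· < ·) := by
      rw [List.map_cons, List.pairwise_cons]
      exact ⟨hc.1, hc.2⟩
    simp only [pvMerge]
    rw [if_neg heq, if_pos hlt, ih hs.2 hcpw]
    simp only [Prod.mk.injEq]
    refine ⟨?_, ?_, ?_⟩
    · -- added: ks joins the saved keys but matches no key of (kc,vc)::c
      apply congrArg (List.map Prod.fst)
      apply List.filter_congr
      intro kv hkv
      have hne : ks ≠ kv.1 := ne_of_lt (hksc _ (List.mem_map.mpr ⟨kv, hkv, rfl⟩))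
      simp [hne.symm]
    · -- removed: ks is kept (it is below every key of (kc,vc)::c)
      rw [List.filter_cons]
      have h1 : (!(((kc, vc) :: c).map Prod.fst).contains ks) = true := by
        simp only [Bool.not_eq_true', List.contains_eq_mem, decide_eq_false_iff_not]
        intro hmem
        exact absurd (hksc _ hmem) (lt_irrefl ks)
      rw [h1]
      simp
    · -- changed: ks is dropped (not a key of (kc,vc)::c)
      rw [List.filter_cons]
      have h1 : ((((kc, vc) :: c).map Prod.fst).contains ks && (vs != pvLook ((kc, vc) :: c) ks)) = false := by
        have hco : (((kc, vc) :: c).map Prod.fst).contains ks = false := by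
          simp only [List.contains_eq_mem, decide_eq_false_iff_not]
          intro hmem
          exact absurd (hksc _ hmem) (lt_irrefl ks)
        rw [hco, Bool.false_and]
      rw [h1]
      simp
  | case5 ks vs s kc vc c heq hlt ih =>
    have hgt : kc < ks := by
      rcases lt_trichotomy ks kc with h | h | h
      · exact absurd h hlt
      · exact absurd (beq_iff_eq.mpr h) (by simpa using heq)
      · exact h
    rw [List.map_cons, List.pairwise_cons] at hs hc
    have hsk : ∀ y ∈ s.map Prod.fst, ks < y := hs.1
    have hkcs : ∀ y ∈ ((ks, vs) :: s).map Prod.fst, kc < y := by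
      intro y hy
      rw [List.map_cons] at hy
      rcases List.mem_cons.mp hy with h | h
      · exact h ▸ hgt
      · exact lt_trans hgt (hsk _ h)
    have hspw : (((ks, vs) :: s).map Prod.fst).Pairwise (· < ·) := by
      rw [List.map_cons, List.pairwise_cons]
      exact ⟨hs.1, hs.2⟩
    simp only [pvMerge]
    rw [if_neg heq, if_neg hlt, ih hspw hc.2]
    simp only [Prod.mk.injEq]
    refine ⟨?_, ?_, ?_⟩
    · -- added: kc is kept (below every saved key)
      rw [List.filter_cons]
      have h1 : (!(((ks, vs) :: s).map Prod.fst).contains kc) = true := by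
        simp only [Bool.not_eq_true', List.contains_eq_mem, decide_eq_false_iff_not]
        intro hmem
        exact absurd (hkcs _ hmem) (lt_irrefl kc)
      rw [h1]
      simp
    · -- removed: kc matches no saved key
      apply congrArg (List.map Prod.fst)
      apply List.filter_congr
      intro kv hkv
      have hne : kc ≠ kv.1 := ne_of_lt (hkcs _ (List.mem_map.mpr ⟨kv, hkv, rfl⟩))
      simp [hne.symm]
    · -- changed: kc matches no saved key, so dropping it changes nothing
      apply congrArg (List.map Prod.fst)
      apply List.filter_congr
      intro kv hkv
      have hne : kc ≠ kv.1 := ne_of_lt (hkcs _ (List.mem_map.mpr ⟨kv, hkv, rfl⟩))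
      have hb : (kv.1 == kc) = false := beq_eq_false_iff_ne.mpr hne.symm
      simp [pvLook, hb, hne.symm]

-- Pairwise ≤ plus Nodup gives Pairwise <
lemma pvPairwise_lt {l : List String} (hle : l.Pairwise (· ≤ ·)) (hnd : l.Nodup) :
    l.Pairwise (· < ·) :=
  (hle.and hnd).imp fun h => lt_of_le_of_ne h.1 h.2

-- getD on an association list with distinct keys returns the stored value
lemma pvGetD_eq {l : List (String × String)} {k v : String}
    (h : (k, v) ∈ l) (hnd : (l.map Prod.fst).Nodup) :
    (PySem.Dict.mk l).getD k "" = v :=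
  PySem.Dict.getD_of_mem_items _ (by simpa using h) (by simpa using hnd) ""

lemma pvMem_diff (a b : List String) (x : String) :
    x ∈ PySem.Set.diff a b ↔ (x ∈ a ∧ x ∉ b) := by
  simp [PySem.Set.diff, PySem.Set.contains]

lemma pvMem_inter (a b : List String) (x : String) :
    x ∈ PySem.Set.inter a b ↔ (x ∈ a ∧ x ∈ b) := by
  simp [PySem.Set.inter, PySem.Set.contains]

theorem diff_file_fingerprints_spec : Claim_equal_diff_file_fingerprints := by
  intro saved current _ hpre
  obtain ⟨h1, h2⟩ := hpre
  have h1' : (saved.map (fun x => x.1)).Nodup := h1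
  have h2' : (current.map (fun x => x.1)).Nodup := h2
  unfold Spec_diff_file_fingerprints diff_file_fingerprints diff_file_fingerprints_alt
  have hps : (PySem.List.sorted saved (fun kv => kv.1) false).Perm saved :=
    PySem.List.sorted_perm _ _ _
  have hpc : (PySem.List.sorted current (fun kv => kv.1) false).Perm current :=
    PySem.List.sorted_perm _ _ _
  have hpsk : ((PySem.List.sorted saved (fun kv => kv.1) false).map Prod.fst).Perm
      (saved.map Prod.fst) := hps.map _
  have hpck : ((PySem.List.sorted current (fun kv => kv.1) false).map Prod.fst).Perm
      (current.map Prod.fst) := hpc.map _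
  have hnds : ((PySem.List.sorted saved (fun kv => kv.1) false).map Prod.fst).Nodup :=
    hpsk.nodup_iff.mpr h1
  have hndc : ((PySem.List.sorted current (fun kv => kv.1) false).map Prod.fst).Nodup :=
    hpck.nodup_iff.mpr h2
  have hlts : ((PySem.List.sorted saved (fun kv => kv.1) false).map Prod.fst).Pairwise (· < ·) :=
    pvPairwise_lt (PySem.List.sorted_map_key_pairwise _ _) hnds
  have hltc : ((PySem.List.sorted current (fun kv => kv.1) false).map Prod.fst).Pairwise (· < ·) :=
    pvPairwise_lt (PySem.List.sorted_map_key_pairwise _ _) hndc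
  simp only [PySem.Dict.keys_mk]
  rw [PySem.Set.ofList_eq_self_of_nodup _ h1', PySem.Set.ofList_eq_self_of_nodup _ h2',
    pvMerge_eq _ _ hlts hltc]
  simp only [List.cons.injEq, Prod.mk.injEq, true_and, and_true]
  refine ⟨?_, ?_, ?_⟩
  · -- added
    refine PySem.List.sorted_eq_of_perm_of_pairwise_lt _ _ _ ?_ ?_
    · refine (List.perm_ext_iff_of_nodup ?_ ?_).mpr ?_
      · exact (List.filter_sublist.map Prod.fst).nodup hndc
      · exact show (List.filter _ _).Nodup from h2'.filter _
      · intro x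
        rw [pvMem_diff]
        constructor
        · intro hx
          obtain ⟨kv, hkvf, rfl⟩ := List.mem_map.mp hx
          obtain ⟨hmc', hnc⟩ := List.mem_filter.mp hkvf
          refine ⟨List.mem_map.mpr ⟨kv, hpc.mem_iff.mp hmc', rfl⟩, ?_⟩
          intro hmem
          rw [Bool.not_eq_eq_eq_not, Bool.not_true, List.contains_eq_mem,
            decide_eq_false_iff_not] at hnc
          exact hnc (hpsk.mem_iff.mpr hmem)
        · rintro ⟨hxc, hxs⟩
          obtain ⟨kv, hkv, rfl⟩ := List.mem_map.mp hxc
          refine List.mem_map.mpr ⟨kv, List.mem_filter.mpr ⟨hpc.mem_iff.mpr hkv, ?_⟩, rfl⟩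
          rw [Bool.not_eq_eq_eq_not, Bool.not_true, List.contains_eq_mem,
            decide_eq_false_iff_not]
          intro hmem
          exact hxs (hpsk.mem_iff.mp hmem)
    · exact hltc.sublist (List.filter_sublist.map Prod.fst)
  · -- removed
    refine PySem.List.sorted_eq_of_perm_of_pairwise_lt _ _ _ ?_ ?_
    · refine (List.perm_ext_iff_of_nodup ?_ ?_).mpr ?_
      · exact (List.filter_sublist.map Prod.fst).nodup hnds
      · exact show (List.filter _ _).Nodup from h1'.filter _
      · intro x
        rw [pvMem_diff]
        constructor
        · intro hx
          obtain ⟨kv, hkvf, rfl⟩ := List.mem_map.mp hx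
          obtain ⟨hms', hnc⟩ := List.mem_filter.mp hkvf
          refine ⟨List.mem_map.mpr ⟨kv, hps.mem_iff.mp hms', rfl⟩, ?_⟩
          intro hmem
          rw [Bool.not_eq_eq_eq_not, Bool.not_true, List.contains_eq_mem,
            decide_eq_false_iff_not] at hnc
          exact hnc (hpck.mem_iff.mpr hmem)
        · rintro ⟨hxs, hxc⟩
          obtain ⟨kv, hkv, rfl⟩ := List.mem_map.mp hxs
          refine List.mem_map.mpr ⟨kv, List.mem_filter.mpr ⟨hps.mem_iff.mpr hkv, ?_⟩, rfl⟩
          rw [Bool.not_eq_eq_eq_not, Bool.not_true, List.contains_eq_mem,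
            decide_eq_false_iff_not]
          intro hmem
          exact hxc (hpck.mem_iff.mp hmem)
    · exact hlts.sublist (List.filter_sublist.map Prod.fst)
  · -- changed
    refine PySem.List.sorted_eq_of_perm_of_pairwise_lt _ _ _ ?_ ?_
    · refine (List.perm_ext_iff_of_nodup ?_ ?_).mpr ?_
      · exact (List.filter_sublist.map Prod.fst).nodup hnds
      · exact show ((List.filter _ _).filter _).Nodup from (h1'.filter _).filter _
      · intro x
        constructor
        · intro hx
          obtain ⟨kv, hkvf, rfl⟩ := List.mem_map.mp hx
          obtain ⟨hms', hcond⟩ := List.mem_filter.mp hkvf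
          rw [Bool.and_eq_true, List.contains_eq_mem, decide_eq_true_eq, bne_iff_ne] at hcond
          obtain ⟨hmemc, hne⟩ := hcond
          have hkvs : kv ∈ saved := hps.mem_iff.mp hms'
          obtain ⟨q, hq, hqx⟩ := List.mem_map.mp (hpck.mem_iff.mp hmemc)
          have hq' : q ∈ PySem.List.sorted current (fun kv => kv.1) false := hpc.mem_iff.mpr hq
          have hgs : (PySem.Dict.mk saved).getD kv.1 "" = kv.2 := pvGetD_eq (by simpa using hkvs) h1
          have hlk : pvLook (PySem.List.sorted current (fun kv => kv.1) false) kv.1 = q.2 := by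
            rw [← hqx]
            exact pvLook_of_mem (by simpa using hq') hndc
          have hgc : (PySem.Dict.mk current).getD kv.1 "" = q.2 := by
            rw [← hqx]
            exact pvGetD_eq (by simpa using hq) h2
          refine List.mem_filter.mpr ⟨(pvMem_inter _ _ _).mpr
            ⟨List.mem_map.mpr ⟨kv, hkvs, rfl⟩, hpck.mem_iff.mp hmemc⟩, ?_⟩
          rw [bne_iff_ne, ne_eq, hgs, hgc]
          rw [hlk] at hne
          exact hne
        · intro hx
          obtain ⟨hxi, hne⟩ := List.mem_filter.mp hx
          obtain ⟨hxs, hxc⟩ := (pvMem_inter _ _ _).mp hxi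
          rw [bne_iff_ne, ne_eq] at hne
          obtain ⟨kv, hkv, hkvx⟩ := List.mem_map.mp hxs
          obtain ⟨q, hq, hqx⟩ := List.mem_map.mp hxc
          have hgs : (PySem.Dict.mk saved).getD x "" = kv.2 := by
            rw [← hkvx]
            exact pvGetD_eq (by simpa using hkv) h1
          have hgc : (PySem.Dict.mk current).getD x "" = q.2 := by
            rw [← hqx]
            exact pvGetD_eq (by simpa using hq) h2
          have hlk : pvLook (PySem.List.sorted current (fun kv => kv.1) false) x = q.2 := by
            rw [← hqx]
            exact pvLook_of_mem (by simpa using (hpc.mem_iff.mpr hq)) hndc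
          refine List.mem_map.mpr ⟨(x, kv.2), List.mem_filter.mpr ⟨?_, ?_⟩, rfl⟩
          · have : (x, kv.2) ∈ saved := by
              rw [← hkvx]
              simpa using hkv
            exact hps.mem_iff.mpr this
          · rw [Bool.and_eq_true, List.contains_eq_mem, decide_eq_true_eq, bne_iff_ne]
            refine ⟨hpck.mem_iff.mpr hxc, ?_⟩
            rw [hlk]
            intro hcontra
            rw [hgs, hgc] at hne
            exact hne (by simpa using hcontra)
    · exact hlts.sublist (List.filter_sublist.map Prod.fst)
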